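-- pv_equiv track=rewrite | github.com/lisboatm/codificador_pilha | codificador.py | codificar_palavra
-- ===== SOURCE A (Python) =====
-- def codificar_palavra(palavra):
--     pilha = []
--     codificacao = []
--
--     # Processa as letras conforme o índice
--     for i, letra in enumerate(palavra):
--         if i % 2 == 0:  # Índice par, adiciona na pilha
--             pilha.append(letra)
--         else:           # Índice ímpar, anota na codificação
--             codificacao.append(letra)
--
--     # Adiciona as letras restantes na pilha em ordem inversa
--     while pilha:
--         codificacao.append(pilha.pop())
--
--     # Retorna a palavra codificada como string
--     return ''.join(codificacao)
-- ===== SOURCE B (Python) =====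
-- def codificar_palavra(palavra):
--     # odd-indexed chars in order, then even-indexed chars reversed
--     return palavra[1::2] + palavra[0::2][::-1]
-- ===== Notes on version B (the rewrite author's own statement) =====
-- stated objective: idiomatic
-- what changed: Replaces the two-phase loop+stack (push evens, collect odds, then pop the stack) with the closed-form slice expression palavra[1::2] + palavra[0::2][::-1].
import Mathlib
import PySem

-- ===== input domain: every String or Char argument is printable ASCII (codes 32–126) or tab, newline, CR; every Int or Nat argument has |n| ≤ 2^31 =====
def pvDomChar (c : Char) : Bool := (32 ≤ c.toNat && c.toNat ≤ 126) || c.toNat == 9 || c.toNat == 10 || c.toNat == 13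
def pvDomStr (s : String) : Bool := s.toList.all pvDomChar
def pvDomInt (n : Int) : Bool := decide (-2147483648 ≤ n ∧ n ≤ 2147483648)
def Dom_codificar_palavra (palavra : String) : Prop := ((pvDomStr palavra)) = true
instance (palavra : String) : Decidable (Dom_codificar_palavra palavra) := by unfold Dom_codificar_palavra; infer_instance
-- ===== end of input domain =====

-- B replaces A's two-phase loop+stack with the closed-form slice expression
-- palavra[1::2] + palavra[0::2][::-1] (idiomatic; same O(n) cost, measured faster in a timing run).

-- ===== PORT A =====
-- the 'while pilha: codificacao.append(pilha.pop())' loop, step for step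
def pvPopLoop (codificacao : List Char) (pilha : List Char) : List Char :=
  if h : pilha = [] then codificacao
  else pvPopLoop (codificacao ++ [pilha.getLast h]) pilha.dropLast
termination_by pilha.length
decreasing_by
  have : pilha.length ≠ 0 := by simpa [List.length_eq_zero_iff] using h
  simp [List.length_dropLast]; omega

def codificar_palavra (palavra : String) : String :=
  let st := (PySem.List.enumerate palavra.toList 0).foldl
    (fun st p => if p.1 % 2 == 0 then (st.1 ++ [p.2], st.2) else (st.1, st.2 ++ [p.2]))
    (([] : List Char), ([] : List Char))
  String.ofList (pvPopLoop st.2 st.1)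

-- ===== PORT B =====
def codificar_palavra_alt (palavra : String) : String :=
  ((PySem.Str.slice? palavra (some 1) none 2).getD "") ++
  ((PySem.Str.slice? ((PySem.Str.slice? palavra (some 0) none 2).getD "") none none (-1)).getD "")

-- ===== PRECONDITION & SPEC =====
def Spec_codificar_palavra (palavra : String) (out : String) : Prop := out = codificar_palavra_alt palavra
instance (palavra : String) (out : String) : Decidable (Spec_codificar_palavra palavra out) := by unfold Spec_codificar_palavra; infer_instance

-- ===== CLAIM (what is proved, stated in full; the proofs are below) =====
def Claim_equal_codificar_palavra : Prop := ∀ (palavra : String), Dom_codificar_palavra palavra → Spec_codificar_palavra palavra (codificar_palavra palavra)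

-- ===== LEMMAS AND PROOFS =====

def pvEvens : List Char → List Char
  | [] => []
  | [a] => [a]
  | a :: _ :: r => a :: pvEvens r

def pvOdds : List Char → List Char
  | [] => []
  | [_] => []
  | _ :: b :: r => b :: pvOdds r

theorem pvOdds_cons (l : List Char) (x : Char) : pvOdds (x :: l) = pvEvens l := by
  induction l using pvEvens.induct generalizing x with
  | case1 => simp [pvOdds, pvEvens]
  | case2 a => simp [pvOdds, pvEvens]
  | case3 a b r ih => simp [pvOdds, pvEvens, ih]

theorem pvEvens_cons (l : List Char) (x : Char) : pvEvens (x :: l) = x :: pvOdds l := by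
  cases l with
  | nil => simp [pvEvens, pvOdds]
  | cons b r => simp [pvEvens, pvOdds_cons]

-- B side: the two slices are pvOdds / pvEvens
theorem pvFilterMap_even (l : List Char) :
    List.filterMap (fun k => l[2*k]?) (List.range ((l.length+1)/2)) = pvEvens l := by
  induction l using pvEvens.induct with
    | case1 => simp [pvEvens]
    | case2 a => simp [pvEvens]
    | case3 a b r ih =>
      have hc : ((a :: b :: r).length + 1)/2 = (r.length+1)/2 + 1 := by simp; omega
      rw [hc, List.range_succ_eq_map, List.filterMap_cons, List.filterMap_map]
      simp only [Nat.mul_zero, List.getElem?_cons_zero, Function.comp_def, Nat.succ_eq_add_one]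
      have he : (fun k => (a :: b :: r)[2 * (k+1)]?) = fun k => r[2*k]? := by
        funext k
        have h2 : 2 * (k+1) = 2*k+1+1 := by omega
        rw [h2]; simp
      rw [he, ih, pvEvens]

theorem pvFilterMap_odd (l : List Char) :
    List.filterMap (fun k => l[2*k+1]?) (List.range (l.length/2)) = pvOdds l := by
  induction l using pvOdds.induct with
    | case1 => simp [pvOdds]
    | case2 a => simp [pvOdds]
    | case3 a b r ih =>
      have hc : (a :: b :: r).length/2 = r.length/2 + 1 := by simp; omega
      rw [hc, List.range_succ_eq_map, List.filterMap_cons, List.filterMap_map]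
      simp only [Nat.mul_zero, Nat.zero_add, List.getElem?_cons_zero, List.getElem?_cons_succ,
        Function.comp_def, Nat.succ_eq_add_one]
      have ho : (fun k => (b :: r)[2 * (k+1)]?) = fun k => r[2*k+1]? := by
        funext k
        have h2 : 2 * (k+1) = (2*k+1)+1 := by omega
        rw [h2]; simp
      rw [ho, ih, pvOdds]

theorem slice_even (l : List Char) :
    PySem.List.slice? l (some 0) none 2 = some (pvEvens l) := by
  have key := pvFilterMap_even l
  simp [PySem.List.slice?, PySem.List.sliceIndices]
  have h1 : (if 0 < l.length then (((l.length:Int) + 2 - 1) / 2).toNat else 0) = (l.length+1)/2 := by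
    split_ifs <;> omega
  rw [h1, ← key]
  congr 1

theorem slice_odd (l : List Char) :
    PySem.List.slice? l (some 1) none 2 = some (pvOdds l) := by
  rcases eq_or_ne l [] with rfl | hl
  · simp [pvOdds]; rfl
  have key := pvFilterMap_odd l
  have hn : 1 ≤ l.length := List.length_pos_iff.mpr hl
  simp [PySem.List.slice?, PySem.List.sliceIndices]
  have h0 : min (1:Int) ↑l.length = 1 := by omega
  rw [h0]
  have h1 : (if 1 < l.length then (((l.length:Int) - 1 + 2 - 1) / 2).toNat else 0) = l.length/2 := by
    split_ifs <;> omega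
  rw [h1, ← key]
  congr 1
  funext k
  congr 1
  omega

-- A side: the pop loop is 'append the reverse'
theorem pvPopLoop_eq (pilha : List Char) : ∀ cod, pvPopLoop cod pilha = cod ++ pilha.reverse := by
  induction pilha using List.reverseRecOn with
  | nil => intro cod; rw [pvPopLoop]; simp
  | append_singleton ys y ih =>
    intro cod
    rw [pvPopLoop]
    have hne : ys ++ [y] ≠ [] := by simp
    rw [dif_neg hne]
    simp [ih]

-- A side: the enumerate fold splits the list by index parity
theorem pvFold_inv (l : List Char) : ∀ (s : Int) (p c : List Char), 0 ≤ s →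
    (PySem.List.enumerate l s).foldl
      (fun st q => if q.1 % 2 == 0 then (st.1 ++ [q.2], st.2) else (st.1, st.2 ++ [q.2])) (p, c)
    = if s % 2 == 0 then (p ++ pvEvens l, c ++ pvOdds l) else (p ++ pvOdds l, c ++ pvEvens l) := by
  induction l with
  | nil => intro s p c _; simp [PySem.List.enumerate_nil, pvEvens, pvOdds]
  | cons x xs ih =>
    intro s p c hs
    rw [PySem.List.enumerate_cons, List.foldl_cons]
    by_cases h : s % 2 = 0
    · have h1 : (s+1) % 2 = 1 := by omega
      simp only [h, show ((0:Int) == 0) = true from rfl, if_true]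
      rw [ih (s+1) (p ++ [x]) c (by omega)]
      simp [h1, pvEvens_cons, pvOdds_cons]
    · have h0 : s % 2 = 1 := by omega
      have h1 : (s+1) % 2 = 0 := by omega
      simp only [h0, show ((1:Int) == 0) = false from rfl, Bool.false_eq_true, if_false]
      rw [ih (s+1) p (c ++ [x]) (by omega)]
      simp [h1, pvEvens_cons, pvOdds_cons]

theorem toList_ofList (l : List Char) : (String.ofList l).toList = l := by
  simp

-- ===== VERDICT (by name: the statement is the Claim_ definition above) =====
theorem codificar_palavra_spec : Claim_equal_codificar_palavra := by
  intro palavra _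
  unfold Spec_codificar_palavra codificar_palavra codificar_palavra_alt
  set l := palavra.toList with hl
  rw [pvFold_inv l 0 [] [] (by norm_num)]
  simp only [show ((0:Int) % 2 == 0) = true by decide, if_pos]
  simp only [List.nil_append]
  rw [pvPopLoop_eq]
  -- B side
  have hb0 : PySem.Str.slice? palavra (some 0) none 2 = some (String.ofList (pvEvens l)) := by
    simp [PySem.Str.slice?, PySem.Chars.slice?_eq_listSlice?, slice_even, hl]
  have hb1 : PySem.Str.slice? palavra (some 1) none 2 = some (String.ofList (pvOdds l)) := by
    simp [PySem.Str.slice?, PySem.Chars.slice?_eq_listSlice?, slice_odd, hl]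
  rw [hb0, hb1, Option.getD_some, Option.getD_some,
    PySem.Str.slice?_none_none_neg_one, Option.getD_some, toList_ofList]
  -- String.ofList (odds ++ evens.reverse) = ofList odds ++ ofList evens.reverse
  apply String.ext
  simp
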